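-- pv_equiv track=rewrite | github.com/carlzimmerman/zimmerman-formula | research/proof_attempt/HONESTY_REVIEW.py | count_by_omega
-- ===== SOURCE A (Python) =====
-- from collections import defaultdict
--
-- def count_by_omega(N, mu):
--     """Count squarefree integers by omega."""
--     counts = defaultdict(int)
--     for n in range(1, N+1):
--         if mu[n] != 0:
--             # Count prime factors
--             omega = 0
--             temp = n
--             p = 2
--             while p * p <= temp:
--                 if temp % p == 0:
--                     omega += 1
--                     while temp % p == 0:
--                         temp //= p
--                 p += 1
--             if temp > 1:
--                 omega += 1
--             counts[omega] += 1
--     return counts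
-- ===== SOURCE B (Python) =====
-- def count_by_omega(N, mu):
--     """Count squarefree integers by omega (sieve of distinct prime factors)."""
--     # Additive sieve: omega[m] accumulates one per distinct prime p | m, p <= N.
--     omega = {}
--     for p in range(2, N + 1):
--         if omega.get(p, 0) == 0:  # no smaller prime divides p => p is prime
--             for m in range(p, N + 1, p):
--                 omega[m] = omega.get(m, 0) + 1
--     counts = {}
--     for n in range(1, N + 1):
--         if mu[n] != 0:
--             w = omega.get(n, 0)
--             counts[w] = counts.get(w, 0) + 1
--     return counts
-- ===== Notes on version B (the rewrite author's own statement) =====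
-- stated objective: faster
-- what changed: Replaces per-n trial-division factoring (O(sqrt n) per number) with a single additive prime sieve that accumulates omega(m) for every m <= N at once, then tallies the same counts in one pass.
import Mathlib
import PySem

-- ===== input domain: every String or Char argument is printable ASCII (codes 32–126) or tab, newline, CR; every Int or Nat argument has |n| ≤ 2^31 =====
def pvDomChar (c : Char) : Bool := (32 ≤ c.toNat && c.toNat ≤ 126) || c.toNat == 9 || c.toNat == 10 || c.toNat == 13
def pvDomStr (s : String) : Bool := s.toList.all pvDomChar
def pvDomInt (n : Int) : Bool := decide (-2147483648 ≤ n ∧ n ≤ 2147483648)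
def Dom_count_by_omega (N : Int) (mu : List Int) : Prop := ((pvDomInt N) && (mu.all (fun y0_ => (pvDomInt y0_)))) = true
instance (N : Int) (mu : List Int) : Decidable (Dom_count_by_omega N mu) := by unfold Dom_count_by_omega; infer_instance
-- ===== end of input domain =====

-- B replaces A's per-n trial-division factoring with one additive prime sieve over all m ≤ N (objective: faster).

-- ===== PORT A =====
-- 'while temp % p == 0: temp //= p'.  The '1 ≤ temp ∧ 2 ≤ p' part of the guard only
-- makes the recursion terminating; it holds at every call site, so the computation is Python's.
theorem pyStripMeasureDec (temp p : Int) (h : 1 ≤ temp ∧ 2 ≤ p ∧ PySem.Int.mod temp p = 0) :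
    (PySem.Int.floordiv temp p).toNat < temp.toNat := by
  obtain ⟨ht, hp, hm⟩ := h
  have hlt : PySem.Int.floordiv temp p < temp := by
    rw [PySem.Int.floordiv_lt_iff_lt_mul (by omega)]
    nlinarith
  have : 0 ≤ PySem.Int.floordiv temp p := by
    rw [PySem.Int.floordiv_eq_ediv_of_pos (by omega)]
    exact Int.ediv_nonneg (by omega) (by omega)
  omega

def pyStrip (temp p : Int) : Int :=
  if h : 1 ≤ temp ∧ 2 ≤ p ∧ PySem.Int.mod temp p = 0 then
    pyStrip (PySem.Int.floordiv temp p) p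
  else temp
termination_by temp.toNat
decreasing_by exact pyStripMeasureDec temp p h

-- the measure lemmas above/below are cited by the ports' decreasing_by
theorem floordiv_pos_of_dvd (t p : Int) (ht : 1 ≤ t) (hp : 2 ≤ p) (hd : p ∣ t) :
    1 ≤ PySem.Int.floordiv t p := by
  rw [PySem.Int.le_floordiv_iff_mul_le (by omega)]
  have := Int.le_of_dvd (by omega) hd
  omega

theorem pyStrip_pos (temp p : Int) (ht : 1 ≤ temp) (hp : 2 ≤ p) : 1 ≤ pyStrip temp p := by
  induction temp using pyStrip.induct (p := p) with
  | case1 t h ih =>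
    rw [pyStrip, dif_pos h]
    obtain ⟨ht', hp', hm⟩ := h
    rw [PySem.Int.mod_eq_zero_iff_dvd] at hm
    exact ih (floordiv_pos_of_dvd t p ht' hp' hm)
  | case2 t h =>
    rw [pyStrip, dif_neg h]; exact ht

theorem pyStrip_le (temp p : Int) (ht : 1 ≤ temp) (hp : 2 ≤ p) : pyStrip temp p ≤ temp := by
  induction temp using pyStrip.induct (p := p) with
  | case1 t h ih =>
    rw [pyStrip, dif_pos h]
    obtain ⟨ht', hp', hm⟩ := h
    rw [PySem.Int.mod_eq_zero_iff_dvd] at hm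
    have h1 := floordiv_pos_of_dvd t p ht' hp' hm
    have h2 := ih h1
    have hlt : PySem.Int.floordiv t p < t := by
      rw [PySem.Int.floordiv_lt_iff_lt_mul (by omega)]
      nlinarith
    omega
  | case2 t h =>
    rw [pyStrip, dif_neg h]

-- 'while p * p <= temp: …' followed by 'if temp > 1: omega += 1'.  Again the
-- '1 ≤ temp ∧ 2 ≤ p' part of the guard is only for termination and holds at every call.
theorem omegaLoopMeasureDec1 (temp p : Int) (h : 1 ≤ temp ∧ 2 ≤ p ∧ p * p ≤ temp) :
    (2 * pyStrip temp p - (p + 1)).toNat < (2 * temp - p).toNat := by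
  obtain ⟨ht, hp, hpp⟩ := h
  have h2p : 2 * p ≤ p * p := by nlinarith
  have hs1 : 1 ≤ pyStrip temp p := pyStrip_pos temp p ht hp
  have hs2 : pyStrip temp p ≤ temp := pyStrip_le temp p ht hp
  omega

theorem omegaLoopMeasureDec2 (temp p : Int) (h : 1 ≤ temp ∧ 2 ≤ p ∧ p * p ≤ temp) :
    (2 * temp - (p + 1)).toNat < (2 * temp - p).toNat := by
  obtain ⟨ht, hp, hpp⟩ := h
  have h2p : 2 * p ≤ p * p := by nlinarith
  omega

def omegaLoop (temp p acc : Int) : Int :=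
  if h : 1 ≤ temp ∧ 2 ≤ p ∧ p * p ≤ temp then
    if PySem.Int.mod temp p = 0 then
      omegaLoop (pyStrip temp p) (p + 1) (acc + 1)
    else
      omegaLoop temp (p + 1) acc
  else
    if 1 < temp then acc + 1 else acc
termination_by (2 * temp - p).toNat
decreasing_by
  · exact omegaLoopMeasureDec1 temp p h
  · exact omegaLoopMeasureDec2 temp p h

-- the per-n body of A's loop: trial-division count of distinct prime factors
def omegaA (n : Int) : Int := omegaLoop n 2 0

def count_by_omega (N : Int) (mu : List Int) : List (Int × Int) :=
  ((PySem.List.pyRange 1 (N + 1)).foldl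
    (fun counts n =>
      if PySem.List.pyGetD mu n 0 ≠ 0 then counts.modify (omegaA n) 0 (· + 1) else counts)
    PySem.Dict.empty).items

-- ===== PORT B =====
-- 'omega = {}; for p in range(2, N+1): if omega.get(p, 0) == 0: for m in range(p, N+1, p): omega[m] = omega.get(m, 0) + 1'
def sieveOmega (N : Int) : PySem.Dict Int Int :=
  (PySem.List.pyRange 2 (N + 1)).foldl
    (fun d p =>
      if d.getD p 0 = 0 then
        (PySem.List.pyRange p (N + 1) p).foldl (fun d2 m => d2.insert m (d2.getD m 0 + 1)) d
      else d)
    PySem.Dict.empty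

def count_by_omega_alt (N : Int) (mu : List Int) : List (Int × Int) :=
  let omega := sieveOmega N
  ((PySem.List.pyRange 1 (N + 1)).foldl
    (fun counts n =>
      if PySem.List.pyGetD mu n 0 ≠ 0 then
        counts.insert (omega.getD n 0) (counts.getD (omega.getD n 0) 0 + 1)
      else counts)
    PySem.Dict.empty).items

-- ===== PRECONDITION & SPEC =====
-- A raises IndexError on mu[n] as soon as its loop reaches an n ≥ len(mu) (n runs over 1..N); those inputs are excluded.
def Pre_count_by_omega (N : Int) (mu : List Int) : Prop := N ≤ 0 ∨ N < (mu.length : Int)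
instance (N : Int) (mu : List Int) : Decidable (Pre_count_by_omega N mu) := by unfold Pre_count_by_omega; infer_instance
def pvWitness_count_by_omega : Int × List Int := (3, [0, 1, -1, -1])

def Spec_count_by_omega (N : Int) (mu : List Int) (out : List (Int × Int)) : Prop := out = count_by_omega_alt N mu
instance (N : Int) (mu : List Int) (out : List (Int × Int)) : Decidable (Spec_count_by_omega N mu out) := by unfold Spec_count_by_omega; infer_instance

-- ===== CLAIM (what is proved, stated in full; the proofs are below) =====
def Claim_equal_count_by_omega : Prop := ∀ (N : Int) (mu : List Int), Dom_count_by_omega N mu → Pre_count_by_omega N mu → Spec_count_by_omega N mu (count_by_omega N mu)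

-- ===== LEMMAS AND PROOFS =====

theorem dvd_toNat_iff (x : Int) (hx : 1 ≤ x) (q : Nat) : q ∣ x.toNat ↔ (q : Int) ∣ x := by
  rw [← Int.natCast_dvd_natCast, Int.toNat_of_nonneg (by omega)]

-- stripping every factor p removes exactly the prime divisor p
theorem pyStrip_dvd_iff (temp p : Int) (ht : 1 ≤ temp) (hp : 2 ≤ p) (hpp : Prime p)
    (q : Int) (hq : Prime q) (hq0 : 2 ≤ q) :
    q ∣ pyStrip temp p ↔ (q ∣ temp ∧ q ≠ p) := by
  induction temp using pyStrip.induct (p := p) with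
  | case1 t h ih =>
    rw [pyStrip, dif_pos h]
    obtain ⟨ht', hp', hm⟩ := h
    rw [PySem.Int.mod_eq_zero_iff_dvd] at hm
    rw [ih (floordiv_pos_of_dvd t p ht' hp' hm)]
    have heq : PySem.Int.floordiv t p * p = t := by
      rw [PySem.Int.floordiv_eq_ediv_of_pos (by omega)]
      exact Int.ediv_mul_cancel hm
    constructor
    · rintro ⟨hdv, hne⟩
      refine ⟨?_, hne⟩
      rw [← heq]
      exact hdv.mul_right p
    · rintro ⟨hdv, hne⟩
      refine ⟨?_, hne⟩
      rw [← heq] at hdv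
      rcases hq.dvd_mul.mp hdv with h1 | h1
      · exact h1
      · exfalso
        rcases (Int.associated_iff.mp (hq.associated_of_dvd hpp h1)) with h2 | h2
        · exact hne h2
        · omega
  | case2 t h =>
    rw [pyStrip, dif_neg h]
    push Not at h
    have hnd : ¬ p ∣ t := by
      intro hd
      rw [← PySem.Int.mod_eq_zero_iff_dvd] at hd
      exact (h ht hp) hd
    constructor
    · intro hd
      refine ⟨hd, ?_⟩
      rintro rfl; exact hnd hd
    · exact fun ⟨a, _⟩ => a

-- A's trial-division loop computes ω (the number of distinct prime factors)
theorem omegaLoop_eq (temp p acc : Int) (ht : 1 ≤ temp) (hp : 2 ≤ p)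
    (hmin : ∀ q : Int, Prime q → 2 ≤ q → q < p → ¬ q ∣ temp) :
    omegaLoop temp p acc = acc + (temp.toNat.primeFactors.card : Int) := by
  induction temp, p, acc using omegaLoop.induct with
  | case1 t p acc h hm ih =>
    obtain ⟨ht', hp', hsq⟩ := h
    rw [omegaLoop, dif_pos ⟨ht', hp', hsq⟩, if_pos hm]
    rw [PySem.Int.mod_eq_zero_iff_dvd] at hm
    -- p is prime: its least prime factor would otherwise contradict hmin
    have hk := Nat.minFac_prime (n := p.toNat) (by omega)
    have hkd : (p.toNat.minFac : Int) ∣ p := by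
      rw [← dvd_toNat_iff p (by omega)]; exact Nat.minFac_dvd _
    have hkp : p.toNat.Prime := by
      by_cases hlt : (p.toNat.minFac : Int) < p
      · exact absurd (hkd.trans hm)
          (hmin _ (Nat.prime_iff_prime_int.mp hk) (by exact_mod_cast hk.two_le) hlt)
      · have : p.toNat.minFac = p.toNat := by
          have := Nat.minFac_le (n := p.toNat) (by omega)
          omega
        rw [← this]; exact hk
    have hpprime : Prime p := by
      have := Nat.prime_iff_prime_int.mp hkp
      rwa [Int.toNat_of_nonneg (by omega)] at this
    set s := pyStrip t p with hs
    have hs1 : 1 ≤ s := pyStrip_pos t p ht' hp'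
    have hfs : s.toNat.primeFactors = t.toNat.primeFactors.erase p.toNat := by
      ext q
      by_cases hqp : q.Prime
      · simp only [Nat.mem_primeFactors, Finset.mem_erase, Nat.mem_primeFactors]
        rw [dvd_toNat_iff s hs1, dvd_toNat_iff t ht',
            pyStrip_dvd_iff t p ht' hp' hpprime q (Nat.prime_iff_prime_int.mp hqp)
              (by exact_mod_cast hqp.two_le)]
        constructor
        · rintro ⟨_, ⟨hd, hne⟩, _⟩
          refine ⟨by omega, hqp, hd, by omega⟩
        · rintro ⟨hne, _, hd, _⟩
          exact ⟨hqp, ⟨hd, by omega⟩, by omega⟩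
      · simp [Nat.mem_primeFactors, hqp]
    have hpmem : p.toNat ∈ t.toNat.primeFactors := by
      rw [Nat.mem_primeFactors]
      exact ⟨hkp, (dvd_toNat_iff t ht' p.toNat).mpr (by rwa [Int.toNat_of_nonneg (by omega)]),
        by omega⟩
    have hcard : t.toNat.primeFactors.card = s.toNat.primeFactors.card + 1 := by
      rw [hfs, Finset.card_erase_of_mem hpmem]
      have : 0 < t.toNat.primeFactors.card := Finset.card_pos.mpr ⟨_, hpmem⟩
      omega
    rw [ih hs1 (by omega) ?_]
    · push_cast [hcard]; ring
    · intro q hq hq2 hqlt hqd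
      rcases (pyStrip_dvd_iff t p ht' hp' hpprime q hq hq2).mp hqd with ⟨hqt, hqne⟩
      rcases lt_or_eq_of_le (by omega : q ≤ p) with hlt | rfl
      · exact hmin q hq hq2 hlt hqt
      · exact hqne rfl
  | case2 t p acc h hm ih =>
    obtain ⟨ht', hp', hsq⟩ := h
    rw [omegaLoop, dif_pos ⟨ht', hp', hsq⟩, if_neg hm]
    apply ih ht' (by omega)
    intro q hq hq2 hqlt hqd
    rcases lt_or_eq_of_le (by omega : q ≤ p) with hlt | rfl
    · exact hmin q hq hq2 hlt hqd
    · rw [← PySem.Int.mod_eq_zero_iff_dvd] at hqd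
      exact hm hqd
  | case3 t p acc h hlt =>
    rw [omegaLoop, dif_neg h, if_pos hlt]
    have htpp : t < p * p := by
      rcases not_and_or.mp h with h1 | h2
      · omega
      · rcases not_and_or.mp h2 with h3 | h4
        · omega
        · omega
    have htp : t.toNat.Prime := by
      by_contra hnp
      have hk := Nat.minFac_prime (n := t.toNat) (by omega)
      have hsq := Nat.minFac_sq_le_self (n := t.toNat) (by omega) hnp
      have hkd : (t.toNat.minFac : Int) ∣ t := by
        rw [← dvd_toNat_iff t (by omega)]; exact Nat.minFac_dvd _
      have hklt : (t.toNat.minFac : Int) < p := by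
        nlinarith [sq_nonneg ((t.toNat.minFac : Int) - p),
          (by exact_mod_cast hsq : ((t.toNat.minFac : Int)) ^ 2 ≤ (t.toNat : Int)),
          (by omega : (t.toNat : Int) = t), (by exact_mod_cast hk.two_le : (2:Int) ≤ t.toNat.minFac)]
      exact hmin _ (Nat.prime_iff_prime_int.mp hk) (by exact_mod_cast hk.two_le) hklt hkd
    rw [htp.primeFactors]
    simp
  | case4 t p acc h hlt =>
    rw [omegaLoop, dif_neg h, if_neg hlt]
    have ht1 : t = 1 := by omega
    subst ht1
    simp

theorem omegaA_eq (n : Int) (h : 1 ≤ n) : omegaA n = (n.toNat.primeFactors.card : Int) := by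
  rw [omegaA, omegaLoop_eq n 2 0 h (by omega) (fun q _ h2 hlt => absurd hlt (by omega))]
  ring

theorem nodup_pyRange_pos (a b s : Int) (hs : 0 < s) : (PySem.List.pyRange a b s).Nodup := by
  rw [PySem.List.pyRange_of_pos a b hs]
  refine List.Nodup.map ?_ List.nodup_range
  intro k1 k2 h
  simp only at h
  have h2 : s * (k1 : Int) = s * (k2 : Int) := by omega
  exact_mod_cast mul_left_cancel₀ (by omega : s ≠ 0) h2

-- B's sieve invariant: after processing 2..lo-1, the dictionary holds at every 1 ≤ m ≤ N
-- the number of prime divisors of m below lo; running it to the end yields ω(m).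
theorem sieve_fold_inv (N : Int) : ∀ (fuel : Nat) (lo : Int) (d : PySem.Dict Int Int),
    (N + 1 - lo).toNat = fuel → 2 ≤ lo →
    (∀ m : Int, 1 ≤ m → m ≤ N →
      d.getD m 0 = ((m.toNat.primeFactors.filter (fun q : Nat => (q : Int) < lo)).card : Int)) →
    ∀ n : Int, 1 ≤ n → n ≤ N →
      ((PySem.List.pyRange lo (N + 1)).foldl
        (fun d p =>
          if d.getD p 0 = 0 then
            (PySem.List.pyRange p (N + 1) p).foldl (fun d2 m => d2.insert m (d2.getD m 0 + 1)) d
          else d) d).getD n 0 = (n.toNat.primeFactors.card : Int) := by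
  intro fuel
  induction fuel with
  | zero =>
    intro lo d hfuel hlo hinv n hn1 hn2
    have hempty : PySem.List.pyRange lo (N + 1) = [] := by
      rw [PySem.List.pyRange_one, hfuel]
      simp
    rw [hempty, List.foldl_nil, hinv n hn1 hn2]
    congr 1
    rw [Finset.filter_true_of_mem]
    intro q hq
    rw [Nat.mem_primeFactors] at hq
    have hqn : q ≤ n.toNat := Nat.le_of_dvd (by omega) hq.2.1
    omega
  | succ fuel ih =>
    intro lo d hfuel hlo hinv n hn1 hn2
    have hloN : lo ≤ N := by omega
    rw [PySem.List.pyRange_one_cons (by omega : lo < N + 1), List.foldl_cons]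
    -- the dictionary's entry at lo is 0 exactly when lo is prime
    have hprime_iff : d.getD lo 0 = 0 ↔ lo.toNat.Prime := by
      rw [hinv lo (by omega) hloN]
      constructor
      · intro h0
        by_contra hnp
        have hk := Nat.minFac_prime (n := lo.toNat) (by omega)
        have hsq := Nat.minFac_sq_le_self (n := lo.toNat) (by omega) hnp
        have h2k : 2 * lo.toNat.minFac ≤ lo.toNat.minFac * lo.toNat.minFac :=
          Nat.mul_le_mul_right _ hk.two_le
        have hkmem : lo.toNat.minFac ∈
            lo.toNat.primeFactors.filter (fun q : Nat => (q : Int) < lo) := by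
          rw [Finset.mem_filter, Nat.mem_primeFactors]
          refine ⟨⟨hk, Nat.minFac_dvd _, by omega⟩, ?_⟩
          have : lo.toNat.minFac < lo.toNat := by nlinarith [hk.two_le]
          omega
        have := Finset.card_pos.mpr ⟨_, hkmem⟩
        omega
      · intro hp
        rw [hp.primeFactors]
        have : ({lo.toNat} : Finset ℕ).filter (fun q : Nat => (q : Int) < lo) = ∅ := by
          rw [Finset.filter_singleton, if_neg (by omega)]
        rw [this]
        simp
    by_cases hpr : d.getD lo 0 = 0
    · rw [if_pos hpr]
      have hloP : lo.toNat.Prime := hprime_iff.mp hpr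
      refine ih (lo + 1) _ (by omega) (by omega) ?_ n hn1 hn2
      intro m hm1 hm2
      rw [PySem.Dict.getD_foldl_insert_add_one, hinv m hm1 hm2]
      have hmem_iff : m ∈ PySem.List.pyRange lo (N + 1) lo ↔ lo.toNat ∈ m.toNat.primeFactors := by
        rw [PySem.List.mem_pyRange_iff_of_pos (by omega), Nat.mem_primeFactors]
        constructor
        · rintro ⟨hge, hlt, hdv⟩
          have hdvm : lo ∣ m := (dvd_sub_right dvd_rfl).mp (dvd_sub_comm.mp hdv)
          refine ⟨hloP, ?_, by omega⟩
          apply (dvd_toNat_iff m (by omega) lo.toNat).mpr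
          rwa [Int.toNat_of_nonneg (by omega)]
        · rintro ⟨-, hdv, -⟩
          have hdvm : lo ∣ m := by
            have := (dvd_toNat_iff m (by omega) lo.toNat).mp hdv
            rwa [Int.toNat_of_nonneg (by omega)] at this
          have hge : lo ≤ m := Int.le_of_dvd (by omega) hdvm
          exact ⟨hge, by omega, dvd_sub_comm.mpr ((dvd_sub_right dvd_rfl).mpr hdvm)⟩
      have hfilter : m.toNat.primeFactors.filter (fun q : Nat => (q : Int) < lo + 1) =
          if lo.toNat ∈ m.toNat.primeFactors then
            insert lo.toNat (m.toNat.primeFactors.filter (fun q : Nat => (q : Int) < lo))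
          else m.toNat.primeFactors.filter (fun q : Nat => (q : Int) < lo) := by
        split_ifs with hmem
        · ext q
          rw [Finset.mem_insert, Finset.mem_filter, Finset.mem_filter]
          constructor
          · rintro ⟨hqm, hqlt⟩
            by_cases hq : q = lo.toNat
            · exact Or.inl hq
            · have : (q : Int) < lo := by omega
              exact Or.inr ⟨hqm, this⟩
          · rintro (rfl | ⟨hqm, hqlt⟩)
            · exact ⟨hmem, by omega⟩
            · exact ⟨hqm, by omega⟩
        · ext q
          rw [Finset.mem_filter, Finset.mem_filter]
          constructor
          · rintro ⟨hqm, hqlt⟩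
            refine ⟨hqm, ?_⟩
            have : q ≠ lo.toNat := by rintro rfl; exact hmem hqm
            omega
          · rintro ⟨hqm, hqlt⟩
            exact ⟨hqm, by omega⟩
      rw [hfilter]
      by_cases hmem : lo.toNat ∈ m.toNat.primeFactors
      · rw [if_pos hmem]
        have hcnt : (PySem.List.pyRange lo (N + 1) lo).count m = 1 :=
          List.count_eq_one_of_mem (nodup_pyRange_pos lo (N + 1) lo (by omega)) (hmem_iff.mpr hmem)
        rw [hcnt, Finset.card_insert_of_notMem (by
          rw [Finset.mem_filter]
          rintro ⟨-, hlt⟩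
          omega)]
        push_cast
        ring
      · rw [if_neg hmem]
        have hcnt : (PySem.List.pyRange lo (N + 1) lo).count m = 0 :=
          List.count_eq_zero_of_not_mem (fun hc => hmem (hmem_iff.mp hc))
        rw [hcnt]
        push_cast
        ring
    · rw [if_neg hpr]
      have hloNP : ¬ lo.toNat.Prime := fun h => hpr (hprime_iff.mpr h)
      refine ih (lo + 1) d (by omega) (by omega) ?_ n hn1 hn2
      intro m hm1 hm2
      rw [hinv m hm1 hm2]
      apply congrArg
      apply congrArg
      apply Finset.filter_congr
      intro q hq
      rw [Nat.mem_primeFactors] at hq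
      have : q ≠ lo.toNat := by rintro rfl; exact hloNP hq.1
      constructor <;> intro <;> omega

theorem sieveOmega_getD (N n : Int) (h1 : 1 ≤ n) (h2 : n ≤ N) :
    (sieveOmega N).getD n 0 = (n.toNat.primeFactors.card : Int) := by
  rw [sieveOmega]
  apply sieve_fold_inv N (N - 1).toNat 2 PySem.Dict.empty (by omega) (by omega) _ n h1 h2
  intro m hm1 hm2
  rw [PySem.Dict.getD_empty]
  have : m.toNat.primeFactors.filter (fun q : Nat => (q : Int) < 2) = ∅ := by
    rw [Finset.filter_false_of_mem]
    intro q hq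
    rw [Nat.mem_primeFactors] at hq
    have := hq.1.two_le
    omega
  rw [this]
  simp

-- both counting loops tally the same per-n key, so they build the same dictionary
theorem ports_agree (N : Int) (mu : List Int) : count_by_omega N mu = count_by_omega_alt N mu := by
  unfold count_by_omega count_by_omega_alt
  apply congrArg
  simp only [PySem.List.foldl_ite_eq_foldl_filter]
  have hA : ∀ L : List Int,
      L.foldl (fun counts n => counts.modify (omegaA n) 0 (· + 1)) PySem.Dict.empty =
        PySem.Dict.counter (L.map omegaA) := by
    intro L
    rw [PySem.Dict.counter_eq_foldl, List.foldl_map]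
  have hB : ∀ L : List Int,
      L.foldl (fun counts n =>
          counts.insert ((sieveOmega N).getD n 0) (counts.getD ((sieveOmega N).getD n 0) 0 + 1))
        PySem.Dict.empty =
        PySem.Dict.counter (L.map (fun n => (sieveOmega N).getD n 0)) := by
    intro L
    rw [← PySem.Dict.foldl_insert_getD_add_one_eq_counter, List.foldl_map]
  rw [hA, hB]
  apply congrArg
  apply List.map_congr_left
  intro n hn
  rw [List.mem_filter] at hn
  rw [PySem.List.mem_pyRange_one] at *
  have h1 : 1 ≤ n := hn.1.1
  have h2 : n ≤ N := by have := hn.1.2; omega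
  rw [omegaA_eq n h1, sieveOmega_getD N n h1 h2]

-- ===== VERDICT (by name: the statement is the Claim_ definition above) =====
theorem count_by_omega_spec : Claim_equal_count_by_omega := by
  intro N mu _ _
  unfold Spec_count_by_omega
  exact ports_agree N mu
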